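-- pv_equiv track=rewrite | github.com/MrBrantCode/unitest_baseline | mut_generate/mist_train_cf/cf_74649/solution.py | second_highest_frequency
-- ===== SOURCE A (Python) =====
-- def second_highest_frequency(lst, range):
--     # filter the list using the range
--     filtered_lst = [x for x in lst if x >= range[0] and x <= range[1]]
--     # get a set of unique values
--     unique_values = set(filtered_lst)
--     # if there's only one unique value, return that value and its frequency
--     if len(unique_values) == 1:
--         return list(unique_values)[0], filtered_lst.count(list(unique_values)[0])
--     # sort the unique values in descending order
--     sorted_values = sorted(unique_values, reverse=True)
--     # the second highest value is now at position 1
--     second_highest = sorted_values[1]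
--     # count the frequency of the second highest value
--     frequency = filtered_lst.count(second_highest)
--     return second_highest, frequency
-- ===== SOURCE B (Python) =====
-- def second_highest_frequency(lst, range):
--     lo, hi = range[0], range[1]
--     filtered = [x for x in lst if lo <= x <= hi]
--     highest = max(filtered)
--     second = max((x for x in filtered if x != highest), default=None)
--     if second is None:
--         return highest, filtered.count(highest)
--     return second, filtered.count(second)
-- ===== Notes on version B (the rewrite author's own statement) =====
-- stated objective: alternative
-- what changed: B replaces A's build-a-set-and-sort-it step by two linear max passes over the filtered list (the maximum, then the maximum of the non-maximal elements), trading the sort of the distinct values for a second scan.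
import Mathlib
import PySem

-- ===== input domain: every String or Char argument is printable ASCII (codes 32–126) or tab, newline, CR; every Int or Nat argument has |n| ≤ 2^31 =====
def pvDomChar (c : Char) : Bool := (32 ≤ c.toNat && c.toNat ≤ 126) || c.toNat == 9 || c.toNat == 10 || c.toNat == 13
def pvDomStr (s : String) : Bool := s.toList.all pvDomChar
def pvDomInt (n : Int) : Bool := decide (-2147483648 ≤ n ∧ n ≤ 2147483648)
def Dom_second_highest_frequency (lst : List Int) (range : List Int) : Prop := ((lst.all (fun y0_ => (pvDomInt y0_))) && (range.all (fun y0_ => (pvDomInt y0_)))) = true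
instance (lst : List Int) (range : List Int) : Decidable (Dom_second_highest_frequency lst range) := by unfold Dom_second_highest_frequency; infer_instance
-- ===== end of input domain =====

-- B replaces A's build-a-set-and-sort-it step by two linear max passes (the maximum, then
-- the maximum of the non-maximal elements) over the filtered list (objective: alternative).

-- ===== PORT A =====
def second_highest_frequency (lst : List Int) (range : List Int) : List Int :=
  match PySem.List.pyGet? range 0, PySem.List.pyGet? range 1 with
  | some r0, some r1 =>
    let filtered_lst := lst.filter (fun x => decide (r0 ≤ x) && decide (x ≤ r1))
    let unique_values := PySem.Set.ofList filtered_lst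
    if PySem.Set.len unique_values = 1 then
      match PySem.List.pyGet? unique_values 0 with
      | some v => [v, (PySem.List.count filtered_lst v : Int)]
      | none => []           -- IndexError (empty set; outside Pre_)
    else
      let sorted_values := PySem.List.sorted unique_values (fun x => x) true
      match PySem.List.pyGet? sorted_values 1 with
      | some second_highest => [second_highest, (PySem.List.count filtered_lst second_highest : Int)]
      | none => []           -- IndexError (fewer than 2 values; outside Pre_)
  | _, _ => []               -- IndexError on range[0]/range[1] (outside Pre_)

-- ===== PORT B =====
def second_highest_frequency_alt (lst : List Int) (range : List Int) : List Int :=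
  match range with
  | lo :: hi :: _ =>
    let filtered := lst.filter (fun x => decide (lo ≤ x) && decide (x ≤ hi))
    match PySem.List.max? filtered (fun x => x) with
    | none => []                       -- Source B: max([]) raises ValueError (outside Pre_)
    | some highest =>
      match PySem.List.max? (filtered.filter (fun x => decide (x ≠ highest))) (fun x => x) with
      | none => [highest, (PySem.List.count filtered highest : Int)]
      | some second => [second, (PySem.List.count filtered second : Int)]
  | _ => []                             -- Source B raises IndexError on range[0]/range[1] (outside Pre_)

-- ===== PRECONDITION & SPEC =====
-- Pre_ excludes exactly the inputs on which A raises IndexError: a range tuple with fewer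
-- than two entries, or no element of lst lying inside [range[0], range[1]].
def Pre_second_highest_frequency (lst : List Int) (range : List Int) : Prop :=
  2 ≤ range.length ∧ ∃ x ∈ lst, range.getD 0 0 ≤ x ∧ x ≤ range.getD 1 0
instance (lst : List Int) (range : List Int) : Decidable (Pre_second_highest_frequency lst range) := by unfold Pre_second_highest_frequency; infer_instance
def pvWitness_second_highest_frequency : List Int × List Int := ([3, 1, 3, 2], [1, 5])

def Spec_second_highest_frequency (lst : List Int) (range : List Int) (out : List Int) : Prop := out = second_highest_frequency_alt lst range
instance (lst : List Int) (range : List Int) (out : List Int) : Decidable (Spec_second_highest_frequency lst range out) := by unfold Spec_second_highest_frequency; infer_instance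

-- ===== CLAIM (what is proved, stated in full; the proofs are below) =====
def Claim_equal_second_highest_frequency : Prop := ∀ (lst : List Int) (range : List Int), Dom_second_highest_frequency lst range → Pre_second_highest_frequency lst range → Spec_second_highest_frequency lst range (second_highest_frequency lst range)

-- ===== LEMMAS AND PROOFS =====

-- all in-range elements equal m → set(filtered) is the singleton [m]
theorem foldl_add_all_eq (t : List Int) (m : Int) (h : ∀ y ∈ t, y = m) :
    t.foldl PySem.Set.add [m] = [m] := by
  induction t with
  | nil => rfl
  | cons a t ih =>
    have ha : a = m := h a (by simp)
    have hadd : PySem.Set.add [m] a = [m] := by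
      rw [ha]; simp [PySem.Set.add, PySem.Set.contains]
    rw [List.foldl_cons, hadd]
    exact ih (fun y hy => h y (by simp [hy]))

theorem ofList_of_all_eq (f : List Int) (m : Int) (hm : m ∈ f) (hall : ∀ y ∈ f, y = m) :
    PySem.Set.ofList f = [m] := by
  cases f with
  | nil => cases hm
  | cons a t =>
    have ha : a = m := hall a (by simp)
    rw [PySem.Set.ofList_eq_foldl, List.foldl_cons]
    have h0 : PySem.Set.add [] a = [m] := by
      rw [ha]; simp [PySem.Set.add, PySem.Set.contains]
    rw [h0]
    exact foldl_add_all_eq t m (fun y hy => hall y (by simp [hy]))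

theorem second_highest_frequency_spec : Claim_equal_second_highest_frequency := by
  intro lst range hdom hpre
  unfold Spec_second_highest_frequency
  obtain ⟨hlen, x0, hx0, hlo, hhi⟩ := hpre
  match range, hlen with
  | r0 :: r1 :: rest, _ =>
  simp only [List.getD_cons_zero, List.getD_cons_succ] at hlo hhi
  have hg0 : PySem.List.pyGet? (r0 :: r1 :: rest) 0 = some r0 := PySem.List.pyGet?_zero_cons _ _
  have hg1 : PySem.List.pyGet? (r0 :: r1 :: rest) 1 = some r1 := by
    have h1 : (1 : Int) = ((1 : Nat) : Int) := rfl
    rw [h1, PySem.List.pyGet?_natCast]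
    simp
  set p : Int → Bool := fun x => decide (r0 ≤ x) && decide (x ≤ r1) with hp
  set f : List Int := lst.filter p with hf
  have hx0f : x0 ∈ f := by
    rw [hf]
    exact List.mem_filter.2 ⟨hx0, by simp [hp, hlo, hhi]⟩
  unfold second_highest_frequency second_highest_frequency_alt
  rw [hg0, hg1]
  dsimp only
  -- the first max: f is nonempty
  rcases hmx : PySem.List.max? f (fun x => x) with _ | m
  · exfalso
    rw [PySem.List.max?_eq_none_iff] at hmx
    rw [hmx] at hx0f
    cases hx0f
  · have hm : m ∈ f := PySem.List.max?_mem hmx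
    have hle : ∀ y ∈ f, y ≤ m := PySem.List.max?_isMax hmx
    dsimp only
    rw [← hp, ← hf]
    rcases hsx : PySem.List.max? (f.filter (fun x => decide (x ≠ m))) (fun x => x) with _ | n
    · -- all in-range elements equal m: A takes the singleton-set branch
      rw [PySem.List.max?_eq_none_iff, List.filter_eq_nil_iff] at hsx
      have hall : ∀ y ∈ f, y = m := by
        intro y hy
        have := hsx y hy
        simpa using this
      have huniq : PySem.Set.ofList f = [m] := ofList_of_all_eq f m hm hall
      rw [huniq]
      simp [PySem.Set.len]
    · -- n is the second-highest distinct value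
      have hnf : n ∈ f ∧ n ≠ m := by
        have := PySem.List.max?_mem hsx
        have h2 := List.mem_filter.1 this
        exact ⟨h2.1, by simpa using h2.2⟩
      obtain ⟨hn, hnm'⟩ := hnf
      have hnm : n < m := lt_of_le_of_ne (hle n hn) hnm'
      have hsec : ∀ y ∈ f, y ≠ m → y ≤ n := by
        intro y hy hyn
        exact PySem.List.max?_isMax hsx y (List.mem_filter.2 ⟨hy, by simpa using hyn⟩)
      -- A's side: the sorted distinct values start with m, then n
      set u : List Int := PySem.Set.ofList f with hu
      have hmem : ∀ y : Int, y ∈ u ↔ y ∈ f := fun y => PySem.Set.mem_ofList f y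
      have hnodup : u.Nodup := PySem.Set.nodup_ofList f
      set v : List Int := PySem.List.sorted u (fun x => x) true with hv
      have hperm : v.Perm u := PySem.List.sorted_perm u (fun x => x) true
      have hvnodup : v.Nodup := hperm.symm.nodup_iff.1 hnodup
      have hpw : v.Pairwise (fun a b => b ≤ a) := PySem.List.sorted_pairwise_rev u (fun x => x)
      have hmu : m ∈ v := hperm.mem_iff.2 ((hmem m).2 hm)
      have hnu : n ∈ v := hperm.mem_iff.2 ((hmem n).2 hn)
      have hlen2 : 2 ≤ v.length := by
        by_contra hc
        rw [not_le] at hc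
        interval_cases h : v.length
        · rw [List.length_eq_zero_iff.1 h] at hmu; cases hmu
        · obtain ⟨a, ha⟩ := List.length_eq_one_iff.1 h
          rw [ha] at hmu hnu
          simp at hmu hnu
          omega
      have hvne : v ≠ [] := by intro h; rw [h] at hlen2; simp at hlen2
      obtain ⟨a, v', hv1⟩ := List.exists_cons_of_ne_nil hvne
      have hv'ne : v' ≠ [] := by
        intro h; rw [hv1, h] at hlen2; simp at hlen2
      obtain ⟨b', t, hv2⟩ := List.exists_cons_of_ne_nil hv'ne
      have hvabt : v = a :: b' :: t := by rw [hv1, hv2]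
      rw [hvabt] at hvnodup hpw hmu hnu
      have hamax : ∀ y ∈ u, y ≤ a := by
        intro y hy
        exact PySem.List.key_head_sorted_rev_ge u (fun x => x) (hv ▸ hvabt) y hy
      have haf : a ∈ f := (hmem a).1 (hperm.mem_iff.1 (by rw [hvabt]; simp))
      have ham : a = m := le_antisymm (hle a haf) (hamax m ((hmem m).2 hm))
      have hbf : b' ∈ f := (hmem b').1 (hperm.mem_iff.1 (by rw [hvabt]; simp))
      have hab' : a ≠ b' := by
        intro h
        exact (List.nodup_cons.1 hvnodup).1 (by rw [h]; simp)
      have hbn : b' ≤ n := hsec b' hbf (fun h => hab' (ham.trans h.symm))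
      have hna : n ≠ a := fun h => absurd (h.trans ham) (by omega)
      have hnb : n ≤ b' := by
        rcases List.mem_cons.1 hnu with h | h
        · exact absurd h hna
        · rcases List.mem_cons.1 h with h2 | h2
          · exact le_of_eq h2
          · exact (List.pairwise_cons.1 ((List.pairwise_cons.1 hpw).2)).1 n h2
      have hbn' : b' = n := le_antisymm hbn hnb
      have hget : PySem.List.pyGet? v 1 = some b' := by
        have h1 : (1 : Int) = ((1 : Nat) : Int) := rfl
        rw [h1, PySem.List.pyGet?_natCast, hvabt]
        simp
      have hlenne : ¬ (PySem.Set.len u = 1) := by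
        have : u.length = v.length := (PySem.List.length_sorted u (fun x => x) true).symm
        simp [PySem.Set.len]
        omega
      rw [if_neg hlenne, hget, hbn']
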